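-- pv_equiv track=rewrite | github.com/answndud/career-ops-kr | src/career_ops_kr/resume_pipeline/tailoring.py | _reorder_skills
-- ===== SOURCE A (Python) =====
-- def _reorder_skills(existing_skills: list[str], emphasis_keywords: list[str]) -> list[str]:
--     original = [str(skill) for skill in existing_skills]
--     emphasized: list[str] = []
--     remaining: list[str] = []
--     for skill in original:
--         if skill.lower() in {keyword.lower() for keyword in emphasis_keywords}:
--             emphasized.append(skill)
--         else:
--             remaining.append(skill)
--     return emphasized + remaining
-- ===== SOURCE B (Python) =====
-- def _reorder_skills(existing_skills: list[str], emphasis_keywords: list[str]) -> list[str]: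
--     original = [str(skill) for skill in existing_skills]
--     kw = {keyword.lower() for keyword in emphasis_keywords}
--     return sorted(original, key=lambda skill: skill.lower() not in kw)
-- ===== Notes on version B (the rewrite author's own statement) =====
-- stated objective: faster
-- what changed: Replaces the explicit two-bucket accumulation loop, which rebuilds the lowered keyword set on every iteration, with one precomputed set and a single stable sort keyed on non-membership, whose stability yields the emphasized-then-remaining partition.
import Mathlib
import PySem

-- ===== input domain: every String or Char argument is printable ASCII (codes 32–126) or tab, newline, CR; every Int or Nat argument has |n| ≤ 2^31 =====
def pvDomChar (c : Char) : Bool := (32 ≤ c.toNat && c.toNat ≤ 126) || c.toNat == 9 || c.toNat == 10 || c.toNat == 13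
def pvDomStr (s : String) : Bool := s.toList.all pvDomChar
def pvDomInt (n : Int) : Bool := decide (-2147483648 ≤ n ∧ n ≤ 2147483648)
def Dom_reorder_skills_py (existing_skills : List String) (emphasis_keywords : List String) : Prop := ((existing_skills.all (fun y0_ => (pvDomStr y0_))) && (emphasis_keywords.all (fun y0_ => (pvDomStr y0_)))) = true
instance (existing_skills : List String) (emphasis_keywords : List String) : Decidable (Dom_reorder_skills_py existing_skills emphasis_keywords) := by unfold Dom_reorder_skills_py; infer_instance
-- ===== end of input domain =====

-- B replaces A's two-bucket loop (which rebuilds the lowered keyword set each iteration) by one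
-- precomputed set and a single stable sort keyed on non-membership (idiomatic one-liner).

-- ===== PORT A =====
def reorder_skills_py (existing_skills : List String) (emphasis_keywords : List String) : List String :=
  let original := existing_skills.map (fun skill => skill)  -- str(skill) on a str is the string itself
  let buckets := original.foldl
    (fun (acc : List String × List String) skill =>
      -- the set comprehension is re-evaluated on every iteration, as in A
      if PySem.Str.lower skill ∈ PySem.Set.ofList (emphasis_keywords.map (fun keyword => PySem.Str.lower keyword)) then
        (acc.1 ++ [skill], acc.2)
      else
        (acc.1, acc.2 ++ [skill]))
    ([], [])
  buckets.1 ++ buckets.2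

-- ===== PORT B =====
def reorder_skills_py_alt (existing_skills : List String) (emphasis_keywords : List String) : List String :=
  let original := existing_skills.map (fun skill => skill)
  let kw := PySem.Set.ofList (emphasis_keywords.map (fun keyword => PySem.Str.lower keyword))
  PySem.List.sorted original (fun skill => decide (PySem.Str.lower skill ∉ kw))

-- ===== PRECONDITION & SPEC =====
def Spec_reorder_skills_py (existing_skills : List String) (emphasis_keywords : List String) (out : List String) : Prop := out = reorder_skills_py_alt existing_skills emphasis_keywords
instance (existing_skills : List String) (emphasis_keywords : List String) (out : List String) : Decidable (Spec_reorder_skills_py existing_skills emphasis_keywords out) := by unfold Spec_reorder_skills_py; infer_instance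

-- ===== CLAIM (what is proved, stated in full; the proofs are below) =====
def Claim_equal_reorder_skills_py : Prop := ∀ (existing_skills : List String) (emphasis_keywords : List String), Dom_reorder_skills_py existing_skills emphasis_keywords → Spec_reorder_skills_py existing_skills emphasis_keywords (reorder_skills_py existing_skills emphasis_keywords)

-- ===== LEMMAS AND PROOFS =====

-- Inserting an x with key x = true into a list whose tail block is all-true goes to the very end.
theorem pv_insertBy_bool_true {α : Type} (key : α → Bool) (x : α) (L : List α)
    (hx : key x = true) :
    PySem.List.insertBy (fun a b => decide (key a < key b)) x L = L ++ [x] := by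
  apply PySem.List.insertBy_of_forall_not_before
  intro y hy
  have : ¬ (key x < key y) := by rw [hx]; simp [Bool.lt_iff]
  simpa using this

-- Inserting an x with key x = false into all-false F ++ all-true T goes to the block boundary.
theorem pv_insertBy_bool_false {α : Type} (key : α → Bool) (x : α) (F T : List α)
    (hF : ∀ a ∈ F, key a = false) (hT : ∀ a ∈ T, key a = true) (hx : key x = false) :
    PySem.List.insertBy (fun a b => decide (key a < key b)) x (F ++ T) = F ++ x :: T := by
  induction F with
  | nil =>
    cases T with
    | nil => simp [PySem.List.insertBy]
    | cons t ts =>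
      have hb : decide (key x < key t) = true := by
        rw [hx, hT t (List.mem_cons_self ..)]; simp
      simp [PySem.List.insertBy, hb]
  | cons f fs ih =>
    have hb : decide (key x < key f) = false := by
      rw [hx, hF f (List.mem_cons_self ..)]; simp
    simp only [List.cons_append, PySem.List.insertBy, hb, Bool.false_eq_true, if_false]
    exact congrArg (f :: ·) (ih (fun a ha => hF a (List.mem_cons_of_mem _ ha)))

-- The insertion-sort fold over a Boolean key stably partitions: false-keyed elements first.
theorem pv_foldl_insertBy_partition {α : Type} (key : α → Bool) :
    ∀ (xs F T : List α), (∀ a ∈ F, key a = false) → (∀ a ∈ T, key a = true) →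
    xs.foldl (fun acc x => PySem.List.insertBy (fun a b => decide (key a < key b)) x acc) (F ++ T)
      = (F ++ xs.filter (fun x => !key x)) ++ (T ++ xs.filter key) := by
  intro xs
  induction xs with
  | nil => intro F T _ _; simp
  | cons x xs ih =>
    intro F T hF hT
    simp only [List.foldl_cons]
    cases hx : key x with
    | true =>
      rw [pv_insertBy_bool_true key x (F ++ T) hx, List.append_assoc,
        ih F (T ++ [x]) hF (by
          intro a ha
          rcases List.mem_append.1 ha with h | h
          · exact hT a h
          · simp at h; subst h; exact hx)]
      simp [hx]
    | false =>
      have h1 : F ++ x :: T = (F ++ [x]) ++ T := by simp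
      rw [pv_insertBy_bool_false key x F T hF hT hx, h1,
        ih (F ++ [x]) T (by
          intro a ha
          rcases List.mem_append.1 ha with h | h
          · exact hF a h
          · simp at h; subst h; exact hx) hT]
      simp [hx]

-- A's two-bucket accumulation is the pair of filters.
theorem pv_foldl_buckets {α : Type} (p : α → Prop) [DecidablePred p] :
    ∀ (xs : List α) (E R : List α),
    xs.foldl (fun (acc : List α × List α) x =>
        if p x then (acc.1 ++ [x], acc.2) else (acc.1, acc.2 ++ [x])) (E, R)
      = (E ++ xs.filter (fun x => decide (p x)), R ++ xs.filter (fun x => !decide (p x))) := by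
  intro xs
  induction xs with
  | nil => intro E R; simp
  | cons x xs ih =>
    intro E R
    simp only [List.foldl_cons]
    by_cases hx : p x
    · rw [if_pos hx, ih]
      simp [hx]
    · rw [if_neg hx, ih]
      simp [hx]

-- ===== VERDICT (by name: the statement is the Claim_ definition above) =====
theorem reorder_skills_py_spec : Claim_equal_reorder_skills_py := by
  intro existing_skills emphasis_keywords _
  show reorder_skills_py existing_skills emphasis_keywords
      = reorder_skills_py_alt existing_skills emphasis_keywords
  unfold reorder_skills_py reorder_skills_py_alt
  simp only []
  set original := existing_skills.map (fun skill => skill) with horig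
  set kw := PySem.Set.ofList (emphasis_keywords.map (fun keyword => PySem.Str.lower keyword)) with hkw
  rw [PySem.List.sorted_eq_foldl_insertBy]
  have hsorted := pv_foldl_insertBy_partition
    (fun skill => decide (PySem.Str.lower skill ∉ kw)) original [] []
    (by intro a h; simp at h) (by intro a h; simp at h)
  have hbuck := pv_foldl_buckets (fun skill => PySem.Str.lower skill ∈ kw) original [] []
  simp only [List.nil_append, List.append_nil] at hsorted hbuck
  rw [hbuck]
  dsimp only []
  rw [hsorted]
  congr 1 <;> (apply List.filter_congr; intro x hx; simp [decide_not])
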